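-- pv_equiv track=rewrite | github.com/madr/julkalendern | 2015-python/solutions/day_14.py | solve_again
-- ===== SOURCE A (Python) =====
-- from collections import defaultdict
--
-- def solve_again(puzzle_input, checkin=2503):
--     distances = defaultdict(int)
--     subwinners = defaultdict(int)
--     for ts in range(checkin):
--         r = 0
--         longest_distance = 0
--         for speed, duration, rest in puzzle_input:
--             if ts % (duration + rest) < duration:
--                 distances[r] += speed
--             if distances[r] >= longest_distance:
--                 longest_distance = distances[r]
--             r += 1
--
--         for r in [k for k, v in distances.items() if v == longest_distance]:
--             subwinners[r] += 1
--
--     return max(subwinners.values())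
-- ===== SOURCE B (Python) =====
-- def solve_again(puzzle_input, checkin=2503):
--     # Reindeer-major: precompute each reindeer's cumulative distance track,
--     # then count per-second leaders column by column.
--     tracks = []
--     for speed, duration, rest in puzzle_input:
--         period = duration + rest
--         pos, track = 0, []
--         for t in range(checkin):
--             if t % period < duration:
--                 pos += speed
--             track.append(pos)
--         tracks.append(track)
--     subwinners = [0] * len(puzzle_input)
--     for column in zip(*tracks):
--         best = max(column)
--         subwinners = [w + 1 if d == best else w
--                       for w, d in zip(subwinners, column)]
--     return max(subwinners)
-- ===== Notes on version B (the rewrite author's own statement) =====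
-- stated objective: alternative
-- what changed: B swaps A's second-major loop with its running defaultdict distance accumulator for a reindeer-major pass: it precomputes each reindeer's cumulative distance track, transposes with zip(*tracks), and counts per-second leaders column by column in a plain list; Pre_ excludes the inputs where A raises (empty input, checkin <= 0, zero period, no reindeer whose distance stays nonnegative) and with them the corner where every speed is negative, on which A's 0-initialised leader scan credits nobody on all-negative seconds while B counts the true leaders.
-- outside the precondition, e.g. on solve_again([(-1, 0, -3)], 2): A returns 1, B returns 2
-- crash fix: On non-empty input A raises ValueError (max of empty subwinners) when checkin <= 0 or when every speed is negative with every duration >= 1 (A's 0-initialised leader scan then never credits anyone); B returns the max of the leader counts (0 when checkin <= 0). — e.g. on solve_again([(1, 1, 1)], 0): A raises ValueError, B returns 0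
import Mathlib
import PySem

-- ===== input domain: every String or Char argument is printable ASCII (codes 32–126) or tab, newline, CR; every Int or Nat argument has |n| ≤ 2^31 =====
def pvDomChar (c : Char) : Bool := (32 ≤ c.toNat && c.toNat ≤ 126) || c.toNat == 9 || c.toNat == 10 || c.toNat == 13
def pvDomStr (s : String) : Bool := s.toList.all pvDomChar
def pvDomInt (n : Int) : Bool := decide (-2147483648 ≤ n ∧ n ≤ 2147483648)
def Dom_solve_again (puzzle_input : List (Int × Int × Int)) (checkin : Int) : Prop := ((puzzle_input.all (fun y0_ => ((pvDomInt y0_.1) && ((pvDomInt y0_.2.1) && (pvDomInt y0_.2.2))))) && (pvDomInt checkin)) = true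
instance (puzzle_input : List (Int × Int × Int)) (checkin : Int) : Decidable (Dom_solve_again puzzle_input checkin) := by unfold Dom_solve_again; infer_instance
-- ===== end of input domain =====

-- B replaces A's second-major loop with its running defaultdict accumulator by a reindeer-major
-- pass: each reindeer's cumulative track is precomputed, then leaders are counted column by
-- column over the transposed tracks (objective: alternative decomposition, plain lists, no dicts).

-- ===== PORT A =====
-- inner loop body of A; a defaultdict read 'distances[r]' INSERTS the key with 0 when absent,
-- modelled exactly by 'Dict.modify r 0 (fun v => v)'
def pvInner (ts : Int) (st : PySem.Dict Int Int × Int × Int) (tr : Int × Int × Int) :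
    PySem.Dict Int Int × Int × Int :=
  let d0 := st.1
  let r := st.2.1
  let longest := st.2.2
  let d1 := if PySem.Int.mod ts (tr.2.1 + tr.2.2) < tr.2.1 then d0.modify r 0 (· + tr.1) else d0
  let d2 := d1.modify r 0 (fun v => v)
  let v := d2.getD r 0
  let longest' := if v ≥ longest then v else longest
  (d2, r + 1, longest')

def pvOuterA (puzzle_input : List (Int × Int × Int))
    (st : PySem.Dict Int Int × PySem.Dict Int Int) (ts : Int) :
    PySem.Dict Int Int × PySem.Dict Int Int :=
  let res := puzzle_input.foldl (pvInner ts) (st.1, 0, 0)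
  let dist := res.1
  let longest := res.2.2
  let leaders := (dist.items.filter (fun p => p.2 == longest)).map (fun p => p.1)
  let sub := leaders.foldl (fun s k => s.modify k 0 (· + 1)) st.2
  (dist, sub)

def solve_again (puzzle_input : List (Int × Int × Int)) (checkin : Int) : Int :=
  let fin := (PySem.List.pyRange 0 checkin 1).foldl (pvOuterA puzzle_input)
    (PySem.Dict.mk [], PySem.Dict.mk [])
  -- Python's max() raises on an empty dict: Pre_ excludes that, so the default 0 is unreachable
  (PySem.List.max? (fin.2.values) (fun v => v)).getD 0

-- ===== PORT B =====
-- Source B's per-reindeer inner loop: cumulative position and the track list it appends to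
def pvTrack (checkin : Int) (tr : Int × Int × Int) : Int × List Int :=
  (PySem.List.pyRange 0 checkin 1).foldl (fun st t =>
    let pos := if PySem.Int.mod t (tr.2.1 + tr.2.2) < tr.2.1 then st.1 + tr.1 else st.1
    (pos, st.2 ++ [pos])) (0, [])

-- termination measure fact for pvTranspose (cited by its decreasing_by)
theorem pvSumTailsLe : ∀ (ls : List (List Int)),
    ((ls.map (fun l => l.tail)).map List.length).sum ≤ (ls.map List.length).sum := by
  intro ls
  induction ls with
  | nil => simp
  | cons l t ih =>
      simp only [List.map_cons, List.sum_cons]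
      have : l.tail.length ≤ l.length := by
        rw [List.length_tail]; omega
      omega

theorem pvTransposeDec (ls : List (List Int)) (hne : ls ≠ [])
    (hall : ls.any (fun l => l.isEmpty) = false) :
    ((ls.map (fun l => l.tail)).map List.length).sum < (ls.map List.length).sum := by
  cases ls with
  | nil => exact absurd rfl hne
  | cons l t =>
      simp only [List.any_cons, Bool.or_eq_false_iff] at hall
      have hl : l ≠ [] := by
        intro h; rw [h] at hall; simp at hall
      have h1 : l.tail.length < l.length := by
        rw [List.length_tail]
        have := List.length_pos_iff.mpr hl
        omega
      have h2 := pvSumTailsLe t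
      simp only [List.map_cons, List.sum_cons]
      omega

-- port of Python's zip(*tracks): emit columns while every list still has an element
def pvTranspose (ls : List (List Int)) : List (List Int) :=
  if h : ls = [] ∨ ls.any (fun l => l.isEmpty) then []
  else (ls.map (fun l => l.headI)) :: pvTranspose (ls.map (fun l => l.tail))
termination_by (ls.map List.length).sum
decreasing_by
  have hmap : ls.attach.map (fun (x : {x // x ∈ ls}) => (x : List Int).tail)
      = ls.map (fun l => l.tail) := List.attach_map_val
  rw [hmap]
  refine pvTransposeDec ls (fun he => h (Or.inl he)) ?_
  rcases Bool.eq_false_or_eq_true (ls.any (fun l => l.isEmpty)) with ht | hf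
  · exact absurd (Or.inr ht) h
  · exact hf

-- Source B's column loop body
def pvColStep (sw : List Int) (col : List Int) : List Int :=
  let best := (PySem.List.max? col (fun v => v)).getD 0  -- columns are nonempty tuples: default unreachable
  (sw.zip col).map (fun p => if p.2 = best then p.1 + 1 else p.1)

def solve_again_alt (puzzle_input : List (Int × Int × Int)) (checkin : Int) : Int :=
  let tracks := puzzle_input.map (fun tr => (pvTrack checkin tr).2)
  let sub := (pvTranspose tracks).foldl pvColStep (List.replicate puzzle_input.length 0)
  -- Python's max() raises on an empty list: Pre_ excludes that, so the default 0 is unreachable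
  (PySem.List.max? sub (fun v => v)).getD 0

-- ===== PRECONDITION & SPEC =====
-- Pre_ asks for: at least one reindeer and one second, no zero period (A and B raise
-- ZeroDivisionError there), and some reindeer whose distance never goes negative
-- (nonnegative speed, or a duration its period never lets it move).  Without such a
-- reindeer A's 0-initialised leader scan skips crediting anyone on all-negative seconds
-- (or, when that happens every second, raises ValueError), while B credits the true leaders.
def Pre_solve_again (puzzle_input : List (Int × Int × Int)) (checkin : Int) : Prop :=
  puzzle_input ≠ [] ∧ 1 ≤ checkin ∧
    (∀ tr ∈ puzzle_input, tr.2.1 + tr.2.2 ≠ 0) ∧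
    ∃ tr ∈ puzzle_input, 0 ≤ tr.1 ∨ (tr.2.1 ≤ 0 ∧ 0 < tr.2.1 + tr.2.2) ∨
      (tr.2.1 + tr.2.2 < 0 ∧ tr.2.1 ≤ tr.2.1 + tr.2.2 + 1)
instance (puzzle_input : List (Int × Int × Int)) (checkin : Int) :
    Decidable (Pre_solve_again puzzle_input checkin) := by unfold Pre_solve_again; infer_instance

def pvWitness_solve_again : (List (Int × Int × Int)) × Int := ([(14, 10, 127), (16, 11, 162)], 20)

-- On non-empty input A raises ValueError (max of empty subwinners) when checkin <= 0 or when
-- every speed is negative with every duration >= 1 (A's 0-initialised leader scan then never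
-- credits anyone); B returns the max of the leader counts (0 when checkin <= 0).
def Raises_solve_again (puzzle_input : List (Int × Int × Int)) (checkin : Int) : Prop :=
  puzzle_input ≠ [] ∧
    (checkin ≤ 0 ∨
      ((∀ tr ∈ puzzle_input, tr.2.1 + tr.2.2 ≠ 0) ∧
       ∀ tr ∈ puzzle_input, tr.1 < 0 ∧ 1 ≤ tr.2.1))
instance (puzzle_input : List (Int × Int × Int)) (checkin : Int) :
    Decidable (Raises_solve_again puzzle_input checkin) := by unfold Raises_solve_again; infer_instance
def pvRaiseWitness_solve_again : (List (Int × Int × Int)) × Int := ([(1, 1, 1)], 0)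
def pvRaiseWitnessOut_solve_again : Int := 0

def Spec_solve_again (puzzle_input : List (Int × Int × Int)) (checkin : Int) (out : Int) : Prop :=
  out = solve_again_alt puzzle_input checkin
instance (puzzle_input : List (Int × Int × Int)) (checkin : Int) (out : Int) :
    Decidable (Spec_solve_again puzzle_input checkin out) := by unfold Spec_solve_again; infer_instance

-- ===== CLAIM (what is proved, stated in full; the proofs are below) =====
def Claim_equal_solve_again : Prop := ∀ (puzzle_input : List (Int × Int × Int)) (checkin : Int), Dom_solve_again puzzle_input checkin → Pre_solve_again puzzle_input checkin → Spec_solve_again puzzle_input checkin (solve_again puzzle_input checkin)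

def Claim_raises_solve_again : Prop := (∀ (puzzle_input : List (Int × Int × Int)) (checkin : Int), Dom_solve_again puzzle_input checkin → Raises_solve_again puzzle_input checkin → ¬ Pre_solve_again puzzle_input checkin) ∧ (Dom_solve_again (pvRaiseWitness_solve_again.1) (pvRaiseWitness_solve_again.2) ∧ Raises_solve_again (pvRaiseWitness_solve_again.1) (pvRaiseWitness_solve_again.2) ∧ solve_again_alt (pvRaiseWitness_solve_again.1) (pvRaiseWitness_solve_again.2) = pvRaiseWitnessOut_solve_again)

-- ===== LEMMAS AND PROOFS =====

def pvRow (ts : Int) (tr : Int × Int × Int) (v : Int) : Int :=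
  if PySem.Int.mod ts (tr.2.1 + tr.2.2) < tr.2.1 then v + tr.1 else v

def pvRows : Nat → List Int → List (Int × Int)
  | _, [] => []
  | j, v :: vs => ((j : Int), v) :: pvRows (j + 1) vs

def pvDval (k : Nat) (tr : Int × Int × Int) : Int :=
  tr.1 * ((List.range k).countP
    (fun (t : Nat) => decide (PySem.Int.mod (t : Int) (tr.2.1 + tr.2.2) < tr.2.1)) : Nat)
theorem pvDval_succ (k : Nat) (tr : Int × Int × Int) :
    pvDval (k + 1) tr = pvRow (k : Int) tr (pvDval k tr) := by
  simp only [pvDval, pvRow, List.range_succ]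
  split_ifs with h
  · simp [h]; ring
  · simp [h]

theorem mem_pvRows (vs : List Int) : ∀ (j : Nat) (q : Int × Int), q ∈ pvRows j vs →
    ∃ i : Nat, j ≤ i ∧ i < j + vs.length ∧ q.1 = (i : Int) := by
  induction vs with
  | nil => intro j q h; simp [pvRows] at h
  | cons v vs ih =>
      intro j q h
      simp only [pvRows, List.mem_cons] at h
      rcases h with h | h
      · exact ⟨j, le_refl _, by simp, by rw [h]⟩
      · obtain ⟨i, h1, h2, h3⟩ := ih (j + 1) q h
        exact ⟨i, by omega, by simp; omega, h3⟩

theorem any_pre_false (pre : List (Int × Int)) (j : Nat)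
    (hpre : ∀ q ∈ pre, ∃ i : Nat, i < j ∧ q.1 = (i : Int)) :
    pre.any (fun p => p.1 == (j : Int)) = false := by
  rw [List.any_eq_false]
  intro q hq
  obtain ⟨i, hi, hq1⟩ := hpre q hq
  simp [hq1]
  omega

theorem find_pre_none (pre : List (Int × Int)) (j : Nat)
    (hpre : ∀ q ∈ pre, ∃ i : Nat, i < j ∧ q.1 = (i : Int)) :
    pre.find? (fun p => p.1 == (j : Int)) = none := by
  rw [List.find?_eq_none]
  intro q hq
  obtain ⟨i, hi, hq1⟩ := hpre q hq
  simp [hq1]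
  omega

theorem map_pre_id (pre : List (Int × Int)) (j : Nat) (x : Int)
    (hpre : ∀ q ∈ pre, ∃ i : Nat, i < j ∧ q.1 = (i : Int)) :
    pre.map (fun p => if p.1 == (j : Int) then ((j : Int), x) else p) = pre := by
  rw [show pre = pre.map id by simp]
  rw [List.map_map]
  apply List.map_congr_left
  intro q hq
  obtain ⟨i, hi, hq1⟩ := hpre q hq
  simp [hq1]
  omega

-- dict ops when key j is absent (pre holds only keys < j)
theorem dict_end_contains (pre : List (Int × Int)) (j : Nat)
    (hpre : ∀ q ∈ pre, ∃ i : Nat, i < j ∧ q.1 = (i : Int)) :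
    (PySem.Dict.mk pre).contains (j : Int) = false := by
  simp [PySem.Dict.contains, any_pre_false pre j hpre]

theorem dict_end_getD (pre : List (Int × Int)) (j : Nat) (w : Int)
    (hpre : ∀ q ∈ pre, ∃ i : Nat, i < j ∧ q.1 = (i : Int)) :
    (PySem.Dict.mk pre).getD (j : Int) w = w := by
  simp [PySem.Dict.getD, PySem.Dict.get?, find_pre_none pre j hpre]

theorem dict_end_insert (pre : List (Int × Int)) (j : Nat) (x : Int)
    (hpre : ∀ q ∈ pre, ∃ i : Nat, i < j ∧ q.1 = (i : Int)) :
    (PySem.Dict.mk pre).insert (j : Int) x = PySem.Dict.mk (pre ++ [((j : Int), x)]) := by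
  simp [PySem.Dict.insert, dict_end_contains pre j hpre]

-- dict ops when key j is present in the middle: pre keys < j, tail keys > j
theorem dict_mid_contains (pre tail : List (Int × Int)) (j : Nat) (w : Int) :
    (PySem.Dict.mk (pre ++ ((j : Int), w) :: tail)).contains (j : Int) = true := by
  simp [PySem.Dict.contains]

theorem dict_mid_getD (pre tail : List (Int × Int)) (j : Nat) (w dflt : Int)
    (hpre : ∀ q ∈ pre, ∃ i : Nat, i < j ∧ q.1 = (i : Int)) :
    (PySem.Dict.mk (pre ++ ((j : Int), w) :: tail)).getD (j : Int) dflt = w := by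
  simp [PySem.Dict.getD, PySem.Dict.get?, List.find?_append, find_pre_none pre j hpre]

theorem dict_mid_insert (pre tail : List (Int × Int)) (j : Nat) (w x : Int)
    (hpre : ∀ q ∈ pre, ∃ i : Nat, i < j ∧ q.1 = (i : Int))
    (htail : ∀ q ∈ tail, ∃ i : Nat, j < i ∧ q.1 = (i : Int)) :
    (PySem.Dict.mk (pre ++ ((j : Int), w) :: tail)).insert (j : Int) x
      = PySem.Dict.mk (pre ++ ((j : Int), x) :: tail) := by
  simp only [PySem.Dict.insert, dict_mid_contains pre tail j w, if_true]
  congr 1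
  rw [List.map_append, map_pre_id pre j x hpre, List.map_cons]
  simp only [beq_self_eq_true, if_true]
  have : tail.map (fun p => if p.1 == (j : Int) then ((j : Int), x) else p) = tail := by
    rw [show tail = tail.map id by simp] 
    conv_lhs => rw [List.map_map]
    apply List.map_congr_left
    intro q hq
    obtain ⟨i, hi, hq1⟩ := htail q hq
    simp [hq1]
    omega
  rw [this]

theorem max_ge_shape (lg x : Int) : (if x ≥ lg then x else lg) = max lg x := by
  simp only [ge_iff_le, max_def]

theorem step_fresh (ts : Int) (tr : Int × Int × Int) (j : Nat) (pre : List (Int × Int)) (lg : Int)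
    (hpre : ∀ q ∈ pre, ∃ i : Nat, i < j ∧ q.1 = (i : Int)) :
    pvInner ts (PySem.Dict.mk pre, (j : Int), lg) tr
      = (PySem.Dict.mk (pre ++ [((j : Int), pvRow ts tr 0)]), (j : Int) + 1,
         max lg (pvRow ts tr 0)) := by
  have hpre' : ∀ (x : Int) (q : Int × Int), q ∈ pre ++ [((j : Int), x)] →
      ∃ i : Nat, i < j + 1 ∧ q.1 = (i : Int) := by
    intro x q hq
    rcases List.mem_append.mp hq with hq | hq
    · obtain ⟨i, hi, h1⟩ := hpre q hq; exact ⟨i, by omega, h1⟩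
    · simp at hq; exact ⟨j, by omega, by rw [hq]⟩
  simp only [pvInner, pvRow, PySem.Dict.modify]
  by_cases h : PySem.Int.mod ts (tr.2.1 + tr.2.2) < tr.2.1
  · rw [if_pos h, if_pos h]
    rw [dict_end_getD pre j 0 hpre, dict_end_insert pre j _ hpre]
    rw [show pre ++ [((j : Int), 0 + tr.1)] = pre ++ ((j : Int), 0 + tr.1) :: [] from rfl]
    rw [dict_mid_getD pre [] j _ 0 hpre, dict_mid_insert pre [] j _ _ hpre (by simp)]
    rw [dict_mid_getD pre [] j _ 0 hpre, max_ge_shape]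
  · rw [if_neg h, if_neg h]
    rw [dict_end_getD pre j 0 hpre, dict_end_insert pre j _ hpre]
    rw [show pre ++ [((j : Int), 0)] = pre ++ ((j : Int), 0) :: [] from rfl]
    rw [dict_mid_getD pre [] j _ 0 hpre, max_ge_shape]

theorem step_full (ts : Int) (tr : Int × Int × Int) (v0 : Int) (j : Nat)
    (pre tail : List (Int × Int)) (lg : Int)
    (hpre : ∀ q ∈ pre, ∃ i : Nat, i < j ∧ q.1 = (i : Int))
    (htail : ∀ q ∈ tail, ∃ i : Nat, j < i ∧ q.1 = (i : Int)) :
    pvInner ts (PySem.Dict.mk (pre ++ ((j : Int), v0) :: tail), (j : Int), lg) tr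
      = (PySem.Dict.mk (pre ++ ((j : Int), pvRow ts tr v0) :: tail), (j : Int) + 1,
         max lg (pvRow ts tr v0)) := by
  simp only [pvInner, pvRow, PySem.Dict.modify]
  by_cases h : PySem.Int.mod ts (tr.2.1 + tr.2.2) < tr.2.1
  · rw [if_pos h, if_pos h]
    rw [dict_mid_getD pre tail j _ 0 hpre, dict_mid_insert pre tail j _ _ hpre htail]
    rw [dict_mid_getD pre tail j _ 0 hpre, dict_mid_insert pre tail j _ _ hpre htail]
    rw [dict_mid_getD pre tail j _ 0 hpre, max_ge_shape]
  · rw [if_neg h, if_neg h]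
    rw [dict_mid_getD pre tail j _ 0 hpre, dict_mid_insert pre tail j _ _ hpre htail]
    rw [dict_mid_getD pre tail j _ 0 hpre, max_ge_shape]

theorem inner_fresh (ts : Int) : ∀ (l : List (Int × Int × Int)) (j : Nat)
    (pre : List (Int × Int)) (lg : Int),
    (∀ q ∈ pre, ∃ i : Nat, i < j ∧ q.1 = (i : Int)) →
    l.foldl (pvInner ts) (PySem.Dict.mk pre, (j : Int), lg)
      = (PySem.Dict.mk (pre ++ pvRows j (l.map (fun tr => pvRow ts tr 0))),
         (j : Int) + l.length,
         l.foldl (fun acc tr => max acc (pvRow ts tr 0)) lg) := by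
  intro l
  induction l with
  | nil => intro j pre lg hpre; simp [pvRows]
  | cons tr l ih =>
      intro j pre lg hpre
      simp only [List.map_cons, List.length_cons, List.foldl_cons]
      rw [step_fresh ts tr j pre lg hpre]
      have hpre' : ∀ q ∈ pre ++ [((j : Int), pvRow ts tr 0)],
          ∃ i : Nat, i < j + 1 ∧ q.1 = (i : Int) := by
        intro q hq
        rcases List.mem_append.mp hq with hq | hq
        · obtain ⟨i, hi, h1⟩ := hpre q hq; exact ⟨i, by omega, h1⟩
        · simp at hq; exact ⟨j, by omega, by rw [hq]⟩
      rw [show (j : Int) + 1 = ((j + 1 : Nat) : Int) by push_cast; ring]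
      rw [ih (j + 1) _ _ hpre']
      simp only [pvRows, List.append_assoc, List.cons_append, List.nil_append, Prod.mk.injEq]
      exact ⟨trivial, by push_cast; ring, trivial⟩

theorem inner_full (ts : Int) : ∀ (l : List ((Int × Int × Int) × Int)) (j : Nat)
    (pre : List (Int × Int)) (lg : Int),
    (∀ q ∈ pre, ∃ i : Nat, i < j ∧ q.1 = (i : Int)) →
    (l.map Prod.fst).foldl (pvInner ts)
        (PySem.Dict.mk (pre ++ pvRows j (l.map Prod.snd)), (j : Int), lg)
      = (PySem.Dict.mk (pre ++ pvRows j (l.map (fun q => pvRow ts q.1 q.2))),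
         (j : Int) + l.length,
         l.foldl (fun acc q => max acc (pvRow ts q.1 q.2)) lg) := by
  intro l
  induction l with
  | nil => intro j pre lg hpre; simp [pvRows]
  | cons q l ih =>
      intro j pre lg hpre
      have htail : ∀ p ∈ pvRows (j + 1) (l.map Prod.snd), ∃ i : Nat, j < i ∧ p.1 = (i : Int) := by
        intro p hp
        obtain ⟨i, h1, h2, h3⟩ := mem_pvRows _ _ _ hp
        exact ⟨i, by omega, h3⟩
      simp only [List.map_cons, List.length_cons, List.foldl_cons]
      rw [show pre ++ pvRows j (q.2 :: l.map Prod.snd)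
          = pre ++ ((j : Int), q.2) :: pvRows (j + 1) (l.map Prod.snd) from rfl]
      rw [step_full ts q.1 q.2 j pre _ lg hpre htail]
      have hpre' : ∀ p ∈ pre ++ [((j : Int), pvRow ts q.1 q.2)],
          ∃ i : Nat, i < j + 1 ∧ p.1 = (i : Int) := by
        intro p hp
        rcases List.mem_append.mp hp with hp | hp
        · obtain ⟨i, hi, h1⟩ := hpre p hp; exact ⟨i, by omega, h1⟩
        · simp at hp; exact ⟨j, by omega, by rw [hp]⟩
      rw [show (j : Int) + 1 = ((j + 1 : Nat) : Int) by push_cast; ring]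
      rw [show pre ++ ((j : Int), pvRow ts q.1 q.2) :: pvRows (j + 1) (l.map Prod.snd)
          = (pre ++ [((j : Int), pvRow ts q.1 q.2)]) ++ pvRows (j + 1) (l.map Prod.snd) by simp]
      rw [ih (j + 1) _ _ hpre']
      simp only [pvRows, List.append_assoc, List.cons_append, List.nil_append, Prod.mk.injEq]
      exact ⟨trivial, by push_cast; ring, trivial⟩

theorem mem_pvRows_iff (vs : List Int) : ∀ (j : Nat) (q : Int × Int),
    q ∈ pvRows j vs ↔ ∃ i : Nat, ∃ h : i < vs.length, q = (((j + i : Nat) : Int), vs[i]) := by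
  induction vs with
  | nil => intro j q; simp [pvRows]
  | cons v vs ih =>
      intro j q
      simp only [pvRows, List.mem_cons, ih (j + 1)]
      constructor
      · rintro (h | ⟨i, hi, h⟩)
        · exact ⟨0, by simp, by simpa using h⟩
        · refine ⟨i + 1, by simpa using Nat.succ_lt_succ hi, ?_⟩
          rw [h]; congr 1; omega
      · rintro ⟨i, hi, h⟩
        cases i with
        | zero => left; simpa using h
        | succ i =>
            right
            refine ⟨i, by simp only [List.length_cons] at hi; omega, ?_⟩
            rw [h]
            have h1 : j + (i + 1) = j + 1 + i := by omega
            simp [h1]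
  
theorem pvRows_keys_nodup (vs : List Int) : ∀ (j : Nat), ((pvRows j vs).map Prod.fst).Nodup := by
  induction vs with
  | nil => intro j; simp [pvRows]
  | cons v vs ih =>
      intro j
      simp only [pvRows, List.map_cons, List.nodup_cons]
      refine ⟨?_, ih (j + 1)⟩
      intro hmem
      obtain ⟨q, hq, hq1⟩ := List.mem_map.mp hmem
      obtain ⟨i, h1, h2, h3⟩ := mem_pvRows (vs) (j + 1) q hq
      rw [h3] at hq1
      have : i = j := by exact_mod_cast hq1
      omega

def pvLeaders (vs : List Int) (c : Int) : List Int :=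
  ((pvRows 0 vs).filter (fun p => p.2 == c)).map Prod.fst

theorem mem_pvLeaders_iff (vs : List Int) (c x : Int) :
    x ∈ pvLeaders vs c ↔ ∃ i : Nat, ∃ h : i < vs.length, x = (i : Int) ∧ vs[i] = c := by
  unfold pvLeaders
  simp only [List.mem_map, List.mem_filter]
  constructor
  · rintro ⟨q, ⟨hq, hqc⟩, hx⟩
    obtain ⟨i, hi, hq'⟩ := (mem_pvRows_iff vs 0 q).mp hq
    refine ⟨i, hi, ?_, ?_⟩
    · rw [← hx, hq']; simp
    · have : q.2 = vs[i] := by rw [hq']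
      rw [← this]; exact (beq_iff_eq.mp hqc)
  · rintro ⟨i, hi, hx, hv⟩
    refine ⟨(((0 + i : Nat) : Int), vs[i]), ⟨?_, by simp [hv]⟩, by simp [hx]⟩
    exact (mem_pvRows_iff vs 0 _).mpr ⟨i, hi, rfl⟩

theorem pvLeaders_nodup (vs : List Int) (c : Int) : (pvLeaders vs c).Nodup := by
  unfold pvLeaders
  exact (pvRows_keys_nodup vs 0).sublist (List.Sublist.map Prod.fst List.filter_sublist)

theorem pvLeaders_count (vs : List Int) (c : Int) (i : Nat) (hi : i < vs.length) :
    (pvLeaders vs c).count (i : Int) = if vs[i] = c then 1 else 0 := by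
  split_ifs with h
  · exact List.count_eq_one_of_mem (pvLeaders_nodup vs c)
      ((mem_pvLeaders_iff vs c _).mpr ⟨i, hi, rfl, h⟩)
  · rw [List.count_eq_zero]
    intro hmem
    obtain ⟨i', hi', hx, hv⟩ := (mem_pvLeaders_iff vs c _).mp hmem
    have heq : i = i' := by exact_mod_cast hx
    subst heq
    exact h hv

def pvBest (pi : List (Int × Int × Int)) (m : Nat) : Int :=
  (pi.map (pvDval m)).foldl max 0

def pvLead (pi : List (Int × Int × Int)) (k i : Nat) : Int :=
  (((List.range k).countP (fun t =>
      decide (pvDval (t + 1) (pi.getD i default) = pvBest pi (t + 1)))) : Nat)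

theorem pvLead_nonneg (pi : List (Int × Int × Int)) (k i : Nat) : 0 ≤ pvLead pi k i :=
  Int.natCast_nonneg _

theorem pvLead_succ (pi : List (Int × Int × Int)) (k i : Nat) :
    pvLead pi (k + 1) i = pvLead pi k i +
      (if pvDval (k + 1) (pi.getD i default) = pvBest pi (k + 1) then 1 else 0) := by
  unfold pvLead
  rw [List.range_succ, List.countP_append]
  simp only [List.countP_cons, List.countP_nil, decide_eq_true_eq, Nat.zero_add]
  split_ifs with h
  · push_cast; ring
  · push_cast; ring

def SubInv (pi : List (Int × Int × Int)) (k : Nat) (sub : PySem.Dict Int Int) : Prop :=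
  (∀ i : Nat, i < pi.length → sub.getD (i : Int) 0 = pvLead pi k i) ∧
  (∀ x ∈ sub.keys, ∃ i : Nat, i < pi.length ∧ x = (i : Int) ∧ 1 ≤ pvLead pi k i) ∧
  (∀ i : Nat, i < pi.length → 1 ≤ pvLead pi k i → (i : Int) ∈ sub.keys) ∧
  sub.keys.Nodup

theorem sub_step (pi : List (Int × Int × Int)) (k : Nat) (sub : PySem.Dict Int Int)
    (h : SubInv pi k sub) :
    SubInv pi (k + 1)
      ((pvLeaders (pi.map (pvDval (k + 1))) (pvBest pi (k + 1))).foldl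
        (fun s x => s.modify x 0 (· + 1)) sub) := by
  obtain ⟨h1, h2, h3, h4⟩ := h
  set L := pvLeaders (pi.map (pvDval (k + 1))) (pvBest pi (k + 1)) with hL
  have hlen : (pi.map (pvDval (k + 1))).length = pi.length := List.length_map ..
  have hmemL : ∀ (i : Nat), i < pi.length →
      ((i : Int) ∈ L ↔ pvDval (k + 1) (pi.getD i default) = pvBest pi (k + 1)) := by
    intro i hi
    rw [hL, mem_pvLeaders_iff]
    constructor
    · rintro ⟨i', hi', hx, hv⟩
      have heq : i = i' := by exact_mod_cast hx
      subst heq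
      rw [List.getElem_map] at hv
      rwa [List.getD_eq_getElem pi default hi]
    · intro hv
      refine ⟨i, by omega, rfl, ?_⟩
      rw [List.getElem_map]
      rwa [← List.getD_eq_getElem pi default hi]
  have hkeys : (L.foldl (fun s x => s.modify x 0 (· + 1)) sub).keys
      = PySem.Set.update sub.keys L := PySem.Dict.keys_foldl_modify L 0 (fun _ _ => (· + 1)) sub
  have hgetD : ∀ v : Int, (L.foldl (fun s x => s.modify x 0 (· + 1)) sub).getD v 0
      = sub.getD v 0 + (L.count v : Nat) := by
    intro v
    exact PySem.Dict.getD_foldl_modify_add_one L sub v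
  have hcnt : ∀ (i : Nat), i < pi.length → (L.count (i : Int) : Int)
      = (if pvDval (k + 1) (pi.getD i default) = pvBest pi (k + 1) then 1 else 0) := by
    intro i hi
    rw [hL, pvLeaders_count _ _ i (by omega)]
    rw [List.getElem_map, ← List.getD_eq_getElem pi default hi]
    split_ifs <;> simp
  refine ⟨?_, ?_, ?_, ?_⟩
  · intro i hi
    rw [hgetD, h1 i hi, pvLead_succ]
    rw [hcnt i hi]
  · intro x hx
    rw [hkeys, PySem.Set.mem_update] at hx
    rcases hx with hx | hx
    · obtain ⟨i, hi, hxi, hlead⟩ := h2 x hx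
      refine ⟨i, hi, hxi, ?_⟩
      rw [pvLead_succ]
      split_ifs <;> omega
    · rw [hL, mem_pvLeaders_iff] at hx
      obtain ⟨i, hi, hxi, hv⟩ := hx
      have hi' : i < pi.length := by omega
      refine ⟨i, hi', hxi, ?_⟩
      rw [pvLead_succ]
      have hv' : pvDval (k + 1) (pi.getD i default) = pvBest pi (k + 1) := by
        rw [List.getElem_map] at hv
        rwa [List.getD_eq_getElem pi default hi']
      rw [if_pos hv']
      have := pvLead_nonneg pi k i
      omega
  · intro i hi hlead
    rw [hkeys, PySem.Set.mem_update]
    rw [pvLead_succ] at hlead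
    by_cases hv : pvDval (k + 1) (pi.getD i default) = pvBest pi (k + 1)
    · right
      exact (hmemL i hi).mpr hv
    · left
      rw [if_neg hv] at hlead
      exact h3 i hi (by omega)
  · rw [show (fun (s : PySem.Dict Int Int) (x : Int) => s.modify x 0 (· + 1))
        = (fun (s : PySem.Dict Int Int) (x : Int) => s.insert x (s.getD x 0 + 1)) from rfl]
    exact PySem.Dict.nodup_keys_foldl_insert L _ sub h4

def pvAState (pi : List (Int × Int × Int)) (k : Nat) :
    PySem.Dict Int Int × PySem.Dict Int Int :=
  ((List.range k).map (fun t => ((t : Nat) : Int))).foldl (pvOuterA pi)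
    (PySem.Dict.mk [], PySem.Dict.mk [])

theorem pvAState_succ (pi : List (Int × Int × Int)) (k : Nat) :
    pvAState pi (k + 1) = pvOuterA pi (pvAState pi k) ((k : Nat) : Int) := by
  unfold pvAState
  rw [List.range_succ, List.map_append, List.foldl_append]
  rfl

theorem pvDval_zero (tr : Int × Int × Int) : pvDval 0 tr = 0 := by
  simp [pvDval]

theorem outerA_compute_zero (pi : List (Int × Int × Int)) :
    pvOuterA pi (PySem.Dict.mk [], PySem.Dict.mk []) ((0 : Nat) : Int)
      = (PySem.Dict.mk (pvRows 0 (pi.map (pvDval 1))),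
         (pvLeaders (pi.map (pvDval 1)) (pvBest pi 1)).foldl
           (fun s x => s.modify x 0 (· + 1)) (PySem.Dict.mk [])) := by
  unfold pvOuterA
  have h := inner_fresh ((0 : Nat) : Int) pi 0 [] 0 (by simp)
  simp only [Nat.cast_zero, List.nil_append] at h ⊢
  rw [h]
  have hval : ∀ tr ∈ pi, pvRow 0 tr 0 = pvDval 1 tr := by
    intro tr _
    have := pvDval_succ 0 tr
    rw [pvDval_zero] at this
    simpa using this.symm
  have hmap : pi.map (fun tr => pvRow 0 tr 0) = pi.map (pvDval 1) :=
    List.map_congr_left hval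
  have hlg : pi.foldl (fun acc tr => max acc (pvRow 0 tr 0)) 0 = pvBest pi 1 := by
    rw [PySem.List.foldl_congr_mem pi _ (fun acc tr => max acc (pvDval 1 tr)) 0
      (fun acc x hx => by rw [hval x hx])]
    unfold pvBest
    rw [List.foldl_map]
  simp only [hmap, hlg]
  rfl

theorem outerA_compute_succ (pi : List (Int × Int × Int)) (k : Nat)
    (sub : PySem.Dict Int Int) :
    pvOuterA pi (PySem.Dict.mk (pvRows 0 (pi.map (pvDval k))), sub) ((k : Nat) : Int)
      = (PySem.Dict.mk (pvRows 0 (pi.map (pvDval (k + 1)))),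
         (pvLeaders (pi.map (pvDval (k + 1))) (pvBest pi (k + 1))).foldl
           (fun s x => s.modify x 0 (· + 1)) sub) := by
  have h := inner_full ((k : Nat) : Int) (pi.map (fun tr => (tr, pvDval k tr))) 0 [] 0 (by simp)
  simp only [Nat.cast_zero, List.nil_append, List.map_map] at h
  have hcomp1 : pi.map (Prod.fst ∘ fun tr => (tr, pvDval k tr)) = pi := by
    simp [Function.comp_def]
  have hcomp2 : pi.map (Prod.snd ∘ fun tr => (tr, pvDval k tr)) = pi.map (pvDval k) := by
    simp [Function.comp_def]
  rw [hcomp1, hcomp2] at h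
  have hval : ∀ tr ∈ pi, pvRow ((k : Nat) : Int) tr (pvDval k tr) = pvDval (k + 1) tr := by
    intro tr _
    exact (pvDval_succ k tr).symm
  have hmap : pi.map ((fun q => pvRow ((k : Nat) : Int) q.1 q.2) ∘ fun tr => (tr, pvDval k tr))
      = pi.map (pvDval (k + 1)) :=
    List.map_congr_left (fun tr htr => hval tr htr)
  have hlg : (pi.map (fun tr => (tr, pvDval k tr))).foldl
      (fun acc q => max acc (pvRow ((k : Nat) : Int) q.1 q.2)) 0 = pvBest pi (k + 1) := by
    rw [List.foldl_map]
    rw [PySem.List.foldl_congr_mem pi _ (fun acc tr => max acc (pvDval (k + 1) tr)) 0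
      (fun acc x hx => by rw [hval x hx])]
    unfold pvBest
    rw [List.foldl_map]
  rw [hmap, hlg] at h
  simp only [pvOuterA]
  rw [h]
  rfl

theorem subinv_zero (pi : List (Int × Int × Int)) : SubInv pi 0 (PySem.Dict.mk []) := by
  refine ⟨?_, ?_, ?_, ?_⟩
  · intro i _
    simp [PySem.Dict.getD, PySem.Dict.get?, pvLead]
  · intro x hx
    simp [PySem.Dict.keys_mk] at hx
  · intro i _ hlead
    simp [pvLead] at hlead
  · simp [PySem.Dict.keys_mk]

theorem AInv (pi : List (Int × Int × Int)) : ∀ k : Nat, 1 ≤ k →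
    (pvAState pi k).1 = PySem.Dict.mk (pvRows 0 (pi.map (pvDval k)))
      ∧ SubInv pi k (pvAState pi k).2 := by
  intro k
  induction k with
  | zero => omega
  | succ k ih =>
      intro _
      by_cases hk0 : k = 0
      · subst hk0
        rw [pvAState_succ]
        have h0 : pvAState pi 0 = (PySem.Dict.mk [], PySem.Dict.mk []) := rfl
        rw [h0, outerA_compute_zero]
        exact ⟨rfl, sub_step pi 0 (PySem.Dict.mk []) (subinv_zero pi)⟩
      · obtain ⟨hd, hs⟩ := ih (by omega)
        rw [pvAState_succ]
        rw [show pvAState pi k = ((pvAState pi k).1, (pvAState pi k).2) from rfl, hd,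
          outerA_compute_succ]
        exact ⟨rfl, sub_step pi k _ hs⟩

theorem foldl_max_pull : ∀ (t : List Int) (a b : Int), t.foldl max (max a b) = max a (t.foldl max b) := by
  intro t
  induction t with
  | nil => intro a b; rfl
  | cons y t ih =>
      intro a b
      simp only [List.foldl_cons]
      rw [max_assoc, ih]

theorem max0_eq (xs : List Int) (hne : xs ≠ []) (hex : ∃ x ∈ xs, 0 ≤ x) :
    (PySem.List.max? xs (fun v => v)).getD 0 = xs.foldl max 0 := by
  cases xs with
  | nil => exact absurd rfl hne
  | cons x t =>
      rw [PySem.List.max?_id_cons]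
      rw [List.foldl_cons, foldl_max_pull]
      have hge : 0 ≤ t.foldl max x := by
        obtain ⟨y, hy, hy0⟩ := hex
        rcases List.mem_cons.mp hy with rfl | hyt
        · exact le_trans hy0 (PySem.List.le_foldl_max t y).1
        · exact le_trans hy0 ((PySem.List.le_foldl_max t x).2 y hyt)
      rw [max_eq_right hge]
      rfl

theorem pvDval_nonneg (tr : Int × Int × Int) (h : 0 ≤ tr.1) (m : Nat) : 0 ≤ pvDval m tr :=
  mul_nonneg h (Int.natCast_nonneg _)

theorem pvDval_never (tr : Int × Int × Int)
    (h : (tr.2.1 ≤ 0 ∧ 0 < tr.2.1 + tr.2.2) ∨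
         (tr.2.1 + tr.2.2 < 0 ∧ tr.2.1 ≤ tr.2.1 + tr.2.2 + 1)) (m : Nat) :
    pvDval m tr = 0 := by
  unfold pvDval
  have hz : (List.range m).countP
      (fun (t : Nat) => decide (PySem.Int.mod (t : Int) (tr.2.1 + tr.2.2) < tr.2.1)) = 0 := by
    rw [List.countP_eq_zero]
    intro t _
    simp only [decide_eq_true_eq]
    rcases h with ⟨hd, hpp⟩ | ⟨hpn, hd⟩
    · have := PySem.Int.mod_nonneg (t : Int) hpp
      omega
    · have := (PySem.Int.mod_neg_bounds (a := (t : Int)) hpn).1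
      omega
  rw [hz]
  simp

-- under Pre_, some reindeer's distance is nonnegative at every time
theorem pvDval_witness (pi : List (Int × Int × Int))
    (hex : ∃ tr ∈ pi, 0 ≤ tr.1 ∨ (tr.2.1 ≤ 0 ∧ 0 < tr.2.1 + tr.2.2) ∨
      (tr.2.1 + tr.2.2 < 0 ∧ tr.2.1 ≤ tr.2.1 + tr.2.2 + 1)) (m : Nat) :
    ∃ x ∈ pi.map (pvDval m), 0 ≤ x := by
  obtain ⟨tr, htr, h⟩ := hex
  refine ⟨pvDval m tr, List.mem_map.mpr ⟨tr, htr, rfl⟩, ?_⟩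
  rcases h with h | h
  · exact pvDval_nonneg tr h m
  · rw [pvDval_never tr h m]

theorem best_eq (pi : List (Int × Int × Int)) (hne : pi ≠ [])
    (hex : ∃ tr ∈ pi, 0 ≤ tr.1 ∨ (tr.2.1 ≤ 0 ∧ 0 < tr.2.1 + tr.2.2) ∨
      (tr.2.1 + tr.2.2 < 0 ∧ tr.2.1 ≤ tr.2.1 + tr.2.2 + 1)) (m : Nat) :
    (PySem.List.max? (pi.map (pvDval m)) (fun v => v)).getD 0 = pvBest pi m := by
  apply max0_eq
  · simp [hne]
  · exact pvDval_witness pi hex m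

-- B side: the track built for one reindeer is its pvDval prefix values
theorem pvTrack_eq (tr : Int × Int × Int) : ∀ (K : Nat),
    ((List.range K).map (fun t => ((t : Nat) : Int))).foldl (fun st t =>
        let pos := if PySem.Int.mod t (tr.2.1 + tr.2.2) < tr.2.1 then st.1 + tr.1 else st.1
        (pos, st.2 ++ [pos])) ((0 : Int), ([] : List Int))
      = (pvDval K tr, (List.range K).map (fun t => pvDval (t + 1) tr)) := by
  intro K
  induction K with
  | zero => simp [pvDval_zero]
  | succ K ih =>
      rw [List.range_succ, List.map_append, List.foldl_append, ih]
      simp only [List.map_cons, List.map_nil, List.foldl_cons, List.foldl_nil, List.map_append]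
      have hpos : (if PySem.Int.mod ((K : Nat) : Int) (tr.2.1 + tr.2.2) < tr.2.1
          then pvDval K tr + tr.1 else pvDval K tr) = pvDval (K + 1) tr := by
        rw [pvDval_succ K tr]; rfl
      simp only [hpos]

theorem pvTrack_snd (tr : Int × Int × Int) (K : Nat) :
    (pvTrack ((K : Nat) : Int) tr).2 = (List.range K).map (fun t => pvDval (t + 1) tr) := by
  unfold pvTrack
  rw [PySem.List.pyRange_zero_natCast K, pvTrack_eq tr K]

-- the transpose of per-element range-maps is the range-map of per-element values
theorem pvTranspose_maps {α : Type} : ∀ (K : Nat) (g : Nat → α → Int) (pi : List α), pi ≠ [] →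
    pvTranspose (pi.map (fun a => (List.range K).map (fun t => g t a)))
      = (List.range K).map (fun t => pi.map (fun a => g t a)) := by
  intro K
  induction K with
  | zero =>
      intro g pi hne
      cases pi with
      | nil => exact absurd rfl hne
      | cons a t =>
          rw [pvTranspose.eq_def]
          simp
  | succ K ih =>
      intro g pi hne
      rw [List.range_succ_eq_map]
      have hinner : ∀ a : α, ((0 : Nat) :: (List.range K).map Nat.succ).map (fun t => g t a)
          = g 0 a :: (List.range K).map (fun t => g (t + 1) a) := by
        intro a
        simp [List.map_map, Function.comp_def, Nat.succ_eq_add_one]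
      simp only [hinner]
      rw [pvTranspose.eq_def]
      rw [dif_neg]
      · have hheads : (pi.map (fun a => g 0 a :: (List.range K).map (fun t => g (t + 1) a))).map
            (fun l => l.headI) = pi.map (fun a => g 0 a) := by
          rw [List.map_map]; rfl
        have htails : (pi.map (fun a => g 0 a :: (List.range K).map (fun t => g (t + 1) a))).map
            (fun l => l.tail) = pi.map (fun a => (List.range K).map (fun t => g (t + 1) a)) := by
          rw [List.map_map]; rfl
        rw [hheads, htails, ih (fun t a => g (t + 1) a) pi hne]
        simp [List.map_map, Function.comp_def, Nat.succ_eq_add_one]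
      · rintro (h1 | h2)
        · exact hne (List.map_eq_nil_iff.mp h1)
        · rw [List.any_eq_true] at h2
          obtain ⟨l, hl, hemp⟩ := h2
          obtain ⟨a, _, rfl⟩ := List.mem_map.mp hl
          simp at hemp

theorem BInv (pi : List (Int × Int × Int)) (hne : pi ≠ [])
    (hex : ∃ tr ∈ pi, 0 ≤ tr.1 ∨ (tr.2.1 ≤ 0 ∧ 0 < tr.2.1 + tr.2.2) ∨
      (tr.2.1 + tr.2.2 < 0 ∧ tr.2.1 ≤ tr.2.1 + tr.2.2 + 1)) : ∀ k : Nat,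
    ((List.range k).map (fun t => pi.map (fun tr => pvDval (t + 1) tr))).foldl pvColStep
        (List.replicate pi.length 0)
      = (List.range pi.length).map (fun i => pvLead pi k i) := by
  intro k
  induction k with
  | zero =>
      simp only [List.range_zero, List.map_nil, List.foldl_nil]
      have : (List.range pi.length).map (fun i => pvLead pi 0 i)
          = (List.range pi.length).map (fun _ => (0 : Int)) :=
        List.map_congr_left (fun i _ => by simp [pvLead])
      rw [this, show (fun (_ : Nat) => (0 : Int)) = Function.const Nat (0 : Int) from rfl,
        List.map_const, List.length_range]
  | succ k ih =>
      rw [List.range_succ, List.map_append, List.foldl_append, ih]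
      simp only [List.map_cons, List.map_nil, List.foldl_cons, List.foldl_nil]
      simp only [pvColStep]
      rw [show pi.map (fun tr => pvDval (k + 1) tr) = pi.map (pvDval (k + 1)) from rfl]
      rw [best_eq pi hne hex (k + 1)]
      apply List.ext_getElem
      · simp
      · intro i h1 h2
        simp only [List.getElem_map, List.getElem_zip, List.getElem_range]
        have hi : i < pi.length := by simpa using h2
        rw [pvLead_succ]
        rw [List.getD_eq_getElem pi default hi]
        split_ifs with h
        · rfl
        · ring

theorem lead_exists (pi : List (Int × Int × Int)) (hne : pi ≠ [])
    (hwit : ∃ tr ∈ pi, 0 ≤ tr.1 ∨ (tr.2.1 ≤ 0 ∧ 0 < tr.2.1 + tr.2.2) ∨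
      (tr.2.1 + tr.2.2 < 0 ∧ tr.2.1 ≤ tr.2.1 + tr.2.2 + 1)) (K : Nat) (hK : 1 ≤ K) :
    ∃ i0 : Nat, i0 < pi.length ∧ 1 ≤ pvLead pi K i0 := by
  have hlen : 0 < pi.length := List.length_pos_iff.mpr hne
  have hex : ∃ i0 : Nat, ∃ h : i0 < pi.length, pvDval 1 pi[i0] = pvBest pi 1 := by
    rcases PySem.List.foldl_max_mem (pi.map (pvDval 1)) 0 with h | h
    · obtain ⟨x, hxmem, hx0⟩ := pvDval_witness pi hwit 1
      obtain ⟨tr, htr, rfl⟩ := List.mem_map.mp hxmem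
      obtain ⟨i0, hi0, hEl⟩ := List.mem_iff_getElem.mp htr
      refine ⟨i0, hi0, ?_⟩
      have hmem : pvDval 1 pi[i0] ∈ pi.map (pvDval 1) :=
        List.mem_map.mpr ⟨pi[i0], List.getElem_mem hi0, rfl⟩
      have hle : pvDval 1 pi[i0] ≤ (pi.map (pvDval 1)).foldl max 0 :=
        (PySem.List.le_foldl_max _ _).2 _ hmem
      have hge : 0 ≤ pvDval 1 pi[i0] := by rw [hEl]; exact hx0
      unfold pvBest
      omega
    · obtain ⟨tr, htr, heq⟩ := List.mem_map.mp h
      obtain ⟨i0, hi0, hEl⟩ := List.mem_iff_getElem.mp htr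
      refine ⟨i0, hi0, ?_⟩
      unfold pvBest
      rw [hEl, heq]
  obtain ⟨i0, hi0, hbest⟩ := hex
  refine ⟨i0, hi0, ?_⟩
  unfold pvLead
  have hpos : 0 < (List.range K).countP (fun t =>
      decide (pvDval (t + 1) (pi.getD i0 default) = pvBest pi (t + 1))) := by
    rw [List.countP_pos_iff]
    refine ⟨0, List.mem_range.mpr (by omega), ?_⟩
    simp only [Nat.zero_add, decide_eq_true_eq]
    rwa [List.getD_eq_getElem pi default hi0]
  omega

theorem final_max (pi : List (Int × Int × Int)) (K : Nat) (sub : PySem.Dict Int Int)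
    (hne : pi ≠ []) (hwit : ∃ tr ∈ pi, 0 ≤ tr.1 ∨ (tr.2.1 ≤ 0 ∧ 0 < tr.2.1 + tr.2.2) ∨
      (tr.2.1 + tr.2.2 < 0 ∧ tr.2.1 ≤ tr.2.1 + tr.2.2 + 1)) (hK : 1 ≤ K)
    (hs : SubInv pi K sub) :
    (PySem.List.max? sub.values (fun v => v)).getD 0
      = (PySem.List.max? ((List.range pi.length).map (fun i => pvLead pi K i))
          (fun v => v)).getD 0 := by
  obtain ⟨h1, h2, h3, h4⟩ := hs
  obtain ⟨i0, hi0, hl0⟩ := lead_exists pi hne hwit K hK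
  set sw := (List.range pi.length).map (fun i => pvLead pi K i) with hsw
  have hswne : sw ≠ [] := by
    rw [hsw]
    simp only [ne_eq, List.map_eq_nil_iff, List.range_eq_nil]
    have := List.length_pos_iff.mpr hne
    omega
  obtain ⟨b, hb⟩ : ∃ b, PySem.List.max? sw (fun v => v) = some b := by
    cases hmb : PySem.List.max? sw (fun v => v) with
    | none => exact absurd ((PySem.List.max?_eq_none_iff _ _).mp hmb) hswne
    | some b => exact ⟨b, rfl⟩
  have hbmem := PySem.List.max?_mem hb
  have hbmax := PySem.List.max?_isMax hb
  obtain ⟨ib, hib, hbeq⟩ : ∃ ib : Nat, ib < pi.length ∧ pvLead pi K ib = b := by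
    rw [hsw] at hbmem
    obtain ⟨i, hi, h⟩ := List.mem_map.mp hbmem
    exact ⟨i, List.mem_range.mp hi, h⟩
  have hb1 : 1 ≤ b := by
    have hmem : pvLead pi K i0 ∈ sw := by
      rw [hsw]; exact List.mem_map.mpr ⟨i0, List.mem_range.mpr hi0, rfl⟩
    have := hbmax _ hmem
    omega
  have hkeysb : ((ib : Nat) : Int) ∈ sub.keys := h3 ib hib (by omega)
  obtain ⟨v, hv⟩ : ∃ v, sub.get? ((ib : Nat) : Int) = some v := by
    cases hg : sub.get? ((ib : Nat) : Int) with
    | none => exact absurd hkeysb ((PySem.Dict.get?_eq_none_iff_not_mem_keys _ _).mp hg)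
    | some v => exact ⟨v, rfl⟩
  have hitems := PySem.Dict.mem_items_of_get?_eq_some sub hv
  have hvb : v = b := by
    have hgd := PySem.Dict.getD_of_mem_items sub hitems h4 0
    rw [h1 ib hib] at hgd
    omega
  have hbval : b ∈ sub.values := by
    subst hvb
    exact List.mem_map.mpr ⟨(((ib : Nat) : Int), v), hitems, rfl⟩
  obtain ⟨a, ha⟩ : ∃ a, PySem.List.max? sub.values (fun v => v) = some a := by
    cases hma : PySem.List.max? sub.values (fun v => v) with
    | none => exact absurd ((PySem.List.max?_eq_none_iff _ _).mp hma) (List.ne_nil_of_mem hbval)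
    | some a => exact ⟨a, rfl⟩
  have hamem := PySem.List.max?_mem ha
  have hamax := PySem.List.max?_isMax ha
  have hasw : a ∈ sw := by
    obtain ⟨q, hq, hq2⟩ := List.mem_map.mp hamem
    have hqk := PySem.Dict.mem_keys_of_mem_items sub hq
    obtain ⟨i, hi, hqi, _⟩ := h2 _ hqk
    have hq' : (((i : Nat) : Int), q.2) ∈ sub.items := by
      rw [← hqi]
      exact hq
    have hgd := PySem.Dict.getD_of_mem_items sub hq' h4 0
    rw [h1 i hi] at hgd
    rw [hsw]
    exact List.mem_map.mpr ⟨i, List.mem_range.mpr hi, by omega⟩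
  have hab : a ≤ b := hbmax a hasw
  have hba : b ≤ a := hamax b hbval
  rw [ha, hb]
  simp only [Option.getD_some]
  omega

theorem solve_againA_eq (pi : List (Int × Int × Int)) (c : Int) :
    solve_again pi c
      = (PySem.List.max? (((PySem.List.pyRange 0 c 1).foldl (pvOuterA pi)
          (PySem.Dict.mk [], PySem.Dict.mk [])).2.values) (fun v => v)).getD 0 := rfl

theorem solve_againB_eval (pi : List (Int × Int × Int)) (hne : pi ≠ []) (K : Nat) :
    solve_again_alt pi ((K : Nat) : Int)
      = (PySem.List.max? (((List.range K).map (fun t => pi.map (fun tr => pvDval (t + 1) tr))).foldl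
          pvColStep (List.replicate pi.length 0)) (fun v => v)).getD 0 := by
  have hdef : solve_again_alt pi ((K : Nat) : Int)
      = (PySem.List.max? ((pvTranspose (pi.map (fun tr => (pvTrack ((K : Nat) : Int) tr).2))).foldl
          pvColStep (List.replicate pi.length 0)) (fun v => v)).getD 0 := rfl
  rw [hdef]
  have htracks : pi.map (fun tr => (pvTrack ((K : Nat) : Int) tr).2)
      = pi.map (fun tr => (List.range K).map (fun t => pvDval (t + 1) tr)) :=
    List.map_congr_left (fun tr _ => pvTrack_snd tr K)
  rw [htracks, pvTranspose_maps K (fun t tr => pvDval (t + 1) tr) pi hne]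

theorem raise_witness_val :
    solve_again_alt pvRaiseWitness_solve_again.1 pvRaiseWitness_solve_again.2
      = pvRaiseWitnessOut_solve_again := by
  have h1 : pvTranspose [([] : List Int)] = [] := by
    rw [pvTranspose.eq_def]; simp
  have hdef : solve_again_alt pvRaiseWitness_solve_again.1 pvRaiseWitness_solve_again.2
      = (PySem.List.max? ((pvTranspose [([] : List Int)]).foldl pvColStep [0])
          (fun v => v)).getD 0 := rfl
  rw [hdef, h1]
  decide

theorem raises_not_pre : ∀ (puzzle_input : List (Int × Int × Int)) (checkin : Int),
    Dom_solve_again puzzle_input checkin → Raises_solve_again puzzle_input checkin →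
      ¬ Pre_solve_again puzzle_input checkin := by
  intro pi c _ hr hp
  obtain ⟨hne, hr2⟩ := hr
  obtain ⟨_, hc1, _, hex⟩ := hp
  rcases hr2 with h | ⟨_, hneg⟩
  · omega
  · obtain ⟨tr, htr, hs⟩ := hex
    have h1 := hneg tr htr
    rcases hs with hs | hs | hs <;> omega

-- ===== VERDICT (by name: the statement is the Claim_ definition above) =====
theorem solve_again_spec : Claim_equal_solve_again := by
  unfold Claim_equal_solve_again
  intro pi checkin _hdom hpre
  obtain ⟨hne, hc1, htr, hex⟩ := hpre
  unfold Spec_solve_again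
  have hceq : checkin = ((checkin.toNat : Nat) : Int) := (Int.toNat_of_nonneg (by omega)).symm
  set K := checkin.toNat with hKdef
  have hK1 : 1 ≤ K := by omega
  rw [hceq, solve_againA_eq, solve_againB_eval pi hne K, PySem.List.pyRange_zero_natCast K]
  rw [BInv pi hne hex K]
  obtain ⟨_, hs⟩ := AInv pi K hK1
  exact final_max pi K (pvAState pi K).2 hne hex hK1 hs

theorem solve_again_raises : Claim_raises_solve_again := by
  unfold Claim_raises_solve_again
  exact ⟨raises_not_pre, by decide, by decide, raise_witness_val⟩

-- self-check: the crash-fix witness really satisfies Raises_ and B's port returns the stated literal there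
theorem pvRaiseWitness_ok :
    Raises_solve_again pvRaiseWitness_solve_again.1 pvRaiseWitness_solve_again.2 ∧
      solve_again_alt pvRaiseWitness_solve_again.1 pvRaiseWitness_solve_again.2
        = pvRaiseWitnessOut_solve_again :=
  ⟨solve_again_raises.2.2.1, solve_again_raises.2.2.2⟩
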